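-- pv_equiv track=rewrite | github.com/cholakova99/AI | slide_puzzle/game.py | create_goal_matrix
-- ===== SOURCE A (Python) =====
-- def create_matrix(size):
--     matrix = []
--     for i in range(0, size):
--         row = [-1] * size
--         matrix.append(row)
--     return matrix
--
-- def create_goal_matrix(size):
--     matrix = create_matrix(size)
--     counter = 1
--     for i in range(0, size):
--         for j in range(0, size):
--             matrix[i][j] = counter
--             counter = counter + 1
--     matrix[size - 1][size - 1] = 0
--     return matrix
-- ===== SOURCE B (Python) =====
-- def create_goal_matrix(size):
--     flat = list(range(1, size * size + 1))
--     rows = [flat[i * size:(i + 1) * size] for i in range(size)]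
--     rows[size - 1][size - 1] = 0
--     return rows
-- ===== Notes on version B (the rewrite author's own statement) =====
-- stated objective: alternative
-- what changed: B builds the flat sequence 1..size*size once and reshapes it into rows by slicing, instead of allocating a -1-filled matrix and overwriting every cell with a running counter in nested loops.
import Mathlib
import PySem

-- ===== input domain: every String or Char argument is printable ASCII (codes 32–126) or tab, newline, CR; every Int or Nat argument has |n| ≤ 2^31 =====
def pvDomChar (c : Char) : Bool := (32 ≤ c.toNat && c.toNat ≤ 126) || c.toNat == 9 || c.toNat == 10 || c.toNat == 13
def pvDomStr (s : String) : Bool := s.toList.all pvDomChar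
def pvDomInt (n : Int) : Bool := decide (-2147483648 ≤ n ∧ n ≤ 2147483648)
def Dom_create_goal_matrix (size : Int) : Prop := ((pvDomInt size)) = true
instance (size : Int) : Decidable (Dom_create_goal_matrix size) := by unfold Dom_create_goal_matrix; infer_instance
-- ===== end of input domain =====

-- B replaces A's counter-driven nested fill with one flat range reshaped by slicing (alternative decomposition, same cost).

-- ===== PORT A =====
-- helper create_matrix of A, transliterated
def create_matrix (size : Int) : List (List Int) :=
  (PySem.List.pyRange 0 size 1).foldl
    (fun matrix _i => matrix ++ [List.replicate size.toNat (-1)]) []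

def create_goal_matrix (size : Int) : List (List Int) :=
  let matrix := create_matrix size
  let st := (PySem.List.pyRange 0 size 1).foldl
    (fun st i =>
      (PySem.List.pyRange 0 size 1).foldl
        (fun (st : List (List Int) × Int) j =>
          (PySem.List.pySetD st.1 i
             (PySem.List.pySetD (PySem.List.pyGetD st.1 i []) j st.2), st.2 + 1))
        st)
    (matrix, 1)
  PySem.List.pySetD st.1 (size - 1)
    (PySem.List.pySetD (PySem.List.pyGetD st.1 (size - 1) []) (size - 1) 0)

-- ===== PORT B =====
def create_goal_matrix_alt (size : Int) : List (List Int) :=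
  let flat := PySem.List.pyRange 1 (size * size + 1) 1
  let rows := (PySem.List.pyRange 0 size 1).map
    (fun i => PySem.List.slice flat (some (i * size)) (some ((i + 1) * size)))
  PySem.List.pySetD rows (size - 1)
    (PySem.List.pySetD (PySem.List.pyGetD rows (size - 1) []) (size - 1) 0)

-- ===== PRECONDITION & SPEC =====
-- Pre_ excludes size ≤ 0, on which A's final statement matrix[size-1][size-1] = 0 raises IndexError (empty matrix).
def Pre_create_goal_matrix (size : Int) : Prop := 1 ≤ size
instance (size : Int) : Decidable (Pre_create_goal_matrix size) := by unfold Pre_create_goal_matrix; infer_instance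
def pvWitness_create_goal_matrix : Int := 3

def Spec_create_goal_matrix (size : Int) (out : List (List Int)) : Prop := out = create_goal_matrix_alt size
instance (size : Int) (out : List (List Int)) : Decidable (Spec_create_goal_matrix size out) := by unfold Spec_create_goal_matrix; infer_instance

-- ===== CLAIM (what is proved, stated in full; the proofs are below) =====
def Claim_equal_create_goal_matrix : Prop := ∀ (size : Int), Dom_create_goal_matrix size → Pre_create_goal_matrix size → Spec_create_goal_matrix size (create_goal_matrix size)

-- ===== LEMMAS AND PROOFS =====

-- the filled matrix both loops produce before zeroing the last cell
def pvGoal (n : Nat) : List (List Int) :=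
  (List.range n).map (fun t => (List.range n).map (fun u => (1 : Int) + ((t * n : Nat) : Int) + ((u : Nat) : Int)))

-- A's inner loop: fills row i from position j on with the running counter c
theorem pv_inner (n : Nat) : ∀ (k j : Nat), j + k = n →
    ∀ (m : List (List Int)) (i : Nat) (him : i < m.length), (m[i]'him).length = n →
    ∀ (c : Int),
    (PySem.List.pyRange (j : Int) (n : Int) 1).foldl
      (fun (st : List (List Int) × Int) jj =>
        (PySem.List.pySetD st.1 (i : Int)
           (PySem.List.pySetD (PySem.List.pyGetD st.1 (i : Int) []) jj st.2), st.2 + 1))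
      (m, c)
    = (m.set i ((m[i]'him).take j ++ (List.range k).map (fun t => c + ((t : Nat) : Int))),
       c + ((k : Nat) : Int)) := by
  intro k
  induction k with
  | zero =>
    intro j hjk m i him hrow c
    rw [PySem.List.pyRange_one_eq_nil (by omega)]
    simp only [List.foldl_nil, List.range_zero, List.map_nil, List.append_nil, Nat.cast_zero,
      add_zero]
    rw [List.take_of_length_le (by omega), List.set_getElem_self]
  | succ k ih =>
    intro j hjk m i him hrow c
    rw [PySem.List.pyRange_one_cons (by exact_mod_cast Nat.lt_of_lt_of_le (Nat.lt_succ_of_le (Nat.le_refl j)) (by omega) : (j : Int) < (n : Int))]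
    rw [List.foldl_cons]
    have hstep :
        ((PySem.List.pySetD m (i : Int)
           (PySem.List.pySetD (PySem.List.pyGetD m (i : Int) []) (j : Int) c), c + 1)
          : List (List Int) × Int)
        = (m.set i ((m[i]'him).set j c), c + 1) := by
      simp [PySem.List.pySetD_natCast, PySem.List.pyGetD_natCast,
        List.getD_eq_getElem?_getD, List.getElem?_eq_getElem him]
    show (PySem.List.pyRange ((j : Int) + 1) (n : Int) 1).foldl _
        (PySem.List.pySetD m (i : Int)
           (PySem.List.pySetD (PySem.List.pyGetD m (i : Int) []) (j : Int) c), c + 1) = _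
    rw [hstep]
    have h1 : (j : Int) + 1 = ((j + 1 : Nat) : Int) := by push_cast; ring
    have him' : i < (m.set i ((m[i]'him).set j c)).length := by simpa using him
    have hrow' : ((m.set i ((m[i]'him).set j c))[i]'him').length = n := by
      rw [List.getElem_set_self]; simp [hrow]
    rw [h1, ih (j + 1) (by omega) _ i him' hrow' (c + 1), Prod.mk.injEq]
    have hj : j < (m[i]'him).length := by omega
    constructor
    · rw [List.set_set]
      congr 1
      rw [List.getElem_set_self]
      rw [List.set_eq_take_cons_drop c hj]
      rw [show j + 1 = ((m[i]'him).take j).length + 1 by simp; omega]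
      rw [List.take_length_add_append]
      simp only [List.take_succ_cons, List.take_zero]
      rw [List.append_assoc]
      congr 1
      rw [List.range_succ_eq_map, List.map_cons, List.map_map]
      simp only [Nat.cast_zero, add_zero, List.singleton_append]
      congr 1
      apply List.map_congr_left
      intro t _
      simp only [Function.comp_apply]
      push_cast; ring
    · push_cast; ring

-- A's outer loop: rows j..n-1 get filled row by row
theorem pv_outer (n : Nat) : ∀ (k j : Nat), j + k = n →
    ∀ (m : List (List Int)), m.length = n → (∀ r ∈ m, r.length = n) →
    ∀ (c : Int),
    (PySem.List.pyRange (j : Int) (n : Int) 1).foldl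
      (fun (st : List (List Int) × Int) ii =>
        (PySem.List.pyRange 0 (n : Int) 1).foldl
          (fun (st : List (List Int) × Int) jj =>
            (PySem.List.pySetD st.1 ii
               (PySem.List.pySetD (PySem.List.pyGetD st.1 ii []) jj st.2), st.2 + 1))
          st)
      (m, c)
    = (m.take j ++ (List.range k).map
          (fun t => (List.range n).map (fun u => c + ((t * n : Nat) : Int) + ((u : Nat) : Int))),
       c + ((k * n : Nat) : Int)) := by
  intro k
  induction k with
  | zero =>
    intro j hjk m hm hrows c
    rw [PySem.List.pyRange_one_eq_nil (show (n : Int) ≤ (j : Int) by exact_mod_cast Nat.le_of_eq hjk.symm)]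
    simp only [List.foldl_nil, List.range_zero, List.map_nil, List.append_nil, Nat.zero_mul,
      Nat.cast_zero, add_zero]
    rw [List.take_of_length_le (by omega)]
  | succ k ih =>
    intro j hjk m hm hrows c
    rw [PySem.List.pyRange_one_cons (by exact_mod_cast (by omega : j < n) : (j : Int) < (n : Int))]
    rw [List.foldl_cons]
    have him : j < m.length := by omega
    have hrow : (m[j]'him).length = n := hrows _ (List.getElem_mem him)
    have hin := pv_inner n n 0 (by omega) m j him hrow c
    simp only [Nat.cast_zero, List.take_zero, List.nil_append] at hin
    rw [hin]
    have h1 : (j : Int) + 1 = ((j + 1 : Nat) : Int) := by push_cast; ring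
    set newrow := (List.range n).map (fun t => c + ((t : Nat) : Int)) with hnew
    have hm' : (m.set j newrow).length = n := by simpa using hm
    have hrows' : ∀ r ∈ m.set j newrow, r.length = n := by
      intro r hr
      rcases List.mem_or_eq_of_mem_set hr with h | h
      · exact hrows r h
      · subst h; simp [hnew]
    rw [h1, ih (j + 1) (by omega) (m.set j newrow) hm' hrows' (c + (n : Int)), Prod.mk.injEq]
    constructor
    · have htake : (m.set j newrow).take (j + 1) = m.take j ++ [newrow] := by
        rw [List.set_eq_take_cons_drop newrow him]
        rw [show j + 1 = (m.take j).length + 1 by simp; omega]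
        rw [List.take_length_add_append]
        simp only [List.take_succ_cons, List.take_zero]
      rw [htake, List.append_assoc]
      congr 1
      rw [List.range_succ_eq_map, List.map_cons, List.map_map]
      simp only [List.singleton_append]
      congr 1
      · rw [hnew]
        apply List.map_congr_left
        intro u _
        simp
      · apply List.map_congr_left
        intro t _
        simp only [Function.comp_apply]
        apply List.map_congr_left
        intro u _
        push_cast; ring
    · push_cast; ring

-- create_matrix builds n rows of n copies of -1
theorem pv_create_matrix (n : Nat) :
    create_matrix (n : Int) = List.replicate n (List.replicate n (-1)) := by
  unfold create_matrix
  rw [PySem.List.foldl_append_singleton_eq_map]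
  simp [PySem.List.pyRange_one]
  rw [List.eq_replicate_iff]
  simp

-- the matrix A holds just before the final assignment is pvGoal n
theorem pv_A_core (n : Nat) :
    ((PySem.List.pyRange 0 (n : Int) 1).foldl
      (fun (st : List (List Int) × Int) ii =>
        (PySem.List.pyRange 0 (n : Int) 1).foldl
          (fun (st : List (List Int) × Int) jj =>
            (PySem.List.pySetD st.1 ii
               (PySem.List.pySetD (PySem.List.pyGetD st.1 ii []) jj st.2), st.2 + 1))
          st)
      (create_matrix (n : Int), 1)).1 = pvGoal n := by
  have hout := pv_outer n n 0 (by omega) (List.replicate n (List.replicate n (-1))) (by simp)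
    (by intro r hr; simp_all [List.eq_of_mem_replicate hr]) 1
  simp only [Nat.cast_zero, List.take_zero, List.nil_append] at hout
  rw [pv_create_matrix, hout]
  simp [pvGoal]

-- B's rows comprehension also builds pvGoal n
theorem pv_B_core (n : Nat) :
    (PySem.List.pyRange 0 (n : Int) 1).map
      (fun i => PySem.List.slice (PySem.List.pyRange 1 ((n : Int) * (n : Int) + 1) 1)
        (some (i * (n : Int))) (some ((i + 1) * (n : Int)))) = pvGoal n := by
  have hflat : PySem.List.pyRange 1 ((n : Int) * (n : Int) + 1) 1
      = (List.range (n * n)).map (fun k : Nat => (1 : Int) + (k : Int)) := by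
    rw [PySem.List.pyRange_one,
      show ((n : Int) * (n : Int) + 1 - 1) = ((n * n : Nat) : Int) by push_cast; ring,
      Int.toNat_natCast]
  rw [hflat, PySem.List.pyRange_one, List.map_map]
  unfold pvGoal
  apply List.map_congr_left
  intro t ht
  rw [List.mem_range] at ht
  simp only [sub_zero, Int.toNat_natCast] at ht
  simp only [Function.comp_apply, zero_add]
  rw [show ((t : Int)) * (n : Int) = ((t * n : Nat) : Int) by push_cast; ring,
    show ((t : Int) + 1) * (n : Int) = ((t * n : Nat) : Int) + ((n : Nat) : Int) by push_cast; ring]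
  rw [PySem.List.slice_natCast_add]
  rw [← List.map_drop, ← List.map_take]
  rw [List.range_eq_range', List.drop_range']
  rw [List.take_range'_of_length_ge (by
    rw [← Nat.sub_mul]
    calc n = 1 * n := (one_mul n).symm
      _ ≤ (n - t) * n := Nat.mul_le_mul_right n (by omega))]
  rw [List.range'_eq_map_range, List.map_map]
  apply List.map_congr_left
  intro u _
  simp only [Function.comp_apply]
  push_cast; ring

-- ===== VERDICT (by name: the statement is the Claim_ definition above) =====
theorem create_goal_matrix_spec : Claim_equal_create_goal_matrix := by
  intro size _ hpre
  unfold Spec_create_goal_matrix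
  obtain ⟨n, rfl⟩ : ∃ n : Nat, size = (n : Int) :=
    ⟨size.toNat, (Int.toNat_of_nonneg (le_trans (by norm_num) hpre)).symm⟩
  simp only [create_goal_matrix, create_goal_matrix_alt]
  rw [pv_A_core n, pv_B_core n]
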